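-- pv_equiv track=rewrite | github.com/NoahJenkins/vgc-coach | tools/autoresearch/context.py | _extract_request
-- ===== SOURCE A (Python) =====
-- def _extract_request(text: str) -> str:
--     lines = text.splitlines()
--     collecting = False
--     request_lines: list[str] = []
--     for line in lines:
--         stripped = line.strip()
--         if not collecting:
--             if line.startswith("Request:"):
--                 collecting = True
--                 initial = line.partition(":")[2].strip()
--                 if initial:
--                     request_lines.append(initial)
--             continue
--
--         if stripped in ("Checks:", "Failure triggers:"):
--             break
--         request_lines.append(line)
--
--     while request_lines and not request_lines[0].strip():
--         request_lines.pop(0)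
--     while request_lines and not request_lines[-1].strip():
--         request_lines.pop()
--     return "\n".join(request_lines).strip()
-- ===== SOURCE B (Python) =====
-- def _extract_request(text: str) -> str:
--     lines = text.splitlines()
--     start = next((i for i, l in enumerate(lines) if l.startswith("Request:")), None)
--     if start is None:
--         return ""
--     rest = lines[start + 1:]
--     end = next((j for j, l in enumerate(rest)
--                 if l.strip() in ("Checks:", "Failure triggers:")), len(rest))
--     body = [lines[start].partition(":")[2].strip()] + rest[:end]
--     return "\n".join(body).strip()
-- ===== Notes on version B (the rewrite author's own statement) =====
-- stated objective: simpler
-- what changed: Replaces A's stateful collecting-flag scan and its two blank-line pop loops with a boundary-finding decomposition: locate the 'Request:' line, locate the end marker, slice the lines between them, and rely on the final join+strip (which subsumes the pop loops).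
import Mathlib
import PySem

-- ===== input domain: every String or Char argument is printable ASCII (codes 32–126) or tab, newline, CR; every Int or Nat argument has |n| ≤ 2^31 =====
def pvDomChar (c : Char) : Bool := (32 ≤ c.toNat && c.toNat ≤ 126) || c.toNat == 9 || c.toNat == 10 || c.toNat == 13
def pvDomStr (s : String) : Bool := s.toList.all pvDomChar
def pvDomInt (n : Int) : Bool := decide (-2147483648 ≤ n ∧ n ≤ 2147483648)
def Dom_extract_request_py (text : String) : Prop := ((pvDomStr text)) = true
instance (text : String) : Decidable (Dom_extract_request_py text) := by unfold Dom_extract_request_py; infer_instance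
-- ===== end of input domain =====

-- B replaces A's stateful collecting-flag scan and its two blank-line pop loops by a
-- boundary-finding decomposition (find start marker, find end marker, slice, join, strip);
-- the final strip subsumes the pop loops. Same return value; objective: simpler.

-- ===== PORT A =====
-- hand port of s.partition(":")[2] (text after the FIRST ':', "" when ':' is absent);
-- exact: PySem.Str.find returns the first occurrence (or -1). Used by both ports, as both
-- Pythons call .partition(":")[2] identically.
def pyPartitionAfterColon (s : String) : String :=
  let i := PySem.Str.find s ":"
  if i = -1 then "" else String.ofList (s.toList.drop (i.toNat + 1))

-- the for-loop of A, with the `collecting` flag and accumulator as state; `break` returns acc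
def extractLoopA : List String → Bool → List String → List String
  | [], _, acc => acc
  | line :: rest, collecting, acc =>
    let stripped := PySem.Str.strip line
    if collecting = false then
      if PySem.Str.startswith line "Request:" = true then
        let initial := PySem.Str.strip (pyPartitionAfterColon line)
        extractLoopA rest true (if initial ≠ "" then acc ++ [initial] else acc)
      else extractLoopA rest false acc
    else if stripped = "Checks:" ∨ stripped = "Failure triggers:" then acc
    else extractLoopA rest collecting (acc ++ [line])

-- the `while request_lines and not request_lines[0].strip(): pop(0)` loop
def popLeadingBlank : List String → List String
  | [] => []
  | line :: rest => if PySem.Str.strip line = "" then popLeadingBlank rest else line :: rest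

def extractA_lines (lines : List String) : String :=
  let request_lines := extractLoopA lines false []
  let request_lines := popLeadingBlank request_lines
  -- the pop-from-the-end while loop, transcribed as the same pop loop on the reversed list
  let request_lines := (popLeadingBlank request_lines.reverse).reverse
  PySem.Str.strip (PySem.Str.join "\n" request_lines)

def extract_request_py (text : String) : String :=
  extractA_lines (PySem.Str.splitlines text)

-- ===== PORT B =====
def extractB_lines (lines : List String) : String :=
  match List.findIdx? (fun l => PySem.Str.startswith l "Request:") lines with
  | none => ""
  | some start =>
    let rest := PySem.List.slice lines (some ((start : Int) + 1)) none
    let stop := (List.findIdx? (fun l =>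
        decide (PySem.Str.strip l = "Checks:" ∨ PySem.Str.strip l = "Failure triggers:")) rest).getD rest.length
    let body := PySem.Str.strip (pyPartitionAfterColon ((PySem.List.pyGet? lines (start : Int)).getD ""))
        :: PySem.List.slice rest none (some (stop : Int))
    PySem.Str.strip (PySem.Str.join "\n" body)

def extract_request_py_alt (text : String) : String :=
  extractB_lines (PySem.Str.splitlines text)

-- ===== PRECONDITION & SPEC =====
def Spec_extract_request_py (text : String) (out : String) : Prop := out = extract_request_py_alt text
instance (text : String) (out : String) : Decidable (Spec_extract_request_py text out) := by unfold Spec_extract_request_py; infer_instance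

-- ===== CLAIM (what is proved, stated in full; the proofs are below) =====
def Claim_equal_extract_request_py : Prop := ∀ (text : String), Dom_extract_request_py text → Spec_extract_request_py text (extract_request_py text)

-- ===== LEMMAS AND PROOFS =====

lemma strip_eq_nil_all_ws {cs : List Char} (h : PySem.Chars.strip cs = []) :
    ∀ c ∈ cs, PySem.Chars.isspace c = true := by
  intro c hc
  by_cases h1 : PySem.Chars.lstrip cs = []
  · exact List.dropWhile_eq_nil_iff.mp h1 c hc
  · have h2 : List.dropWhile PySem.Chars.isspace (PySem.Chars.lstrip cs).reverse = [] := by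
      unfold PySem.Chars.strip PySem.Chars.rstrip at h
      simpa using congrArg List.reverse h
    have hall : ∀ x ∈ PySem.Chars.lstrip cs, PySem.Chars.isspace x = true := by
      intro x hx
      exact List.dropWhile_eq_nil_iff.mp h2 x (by simpa using hx)
    rcases List.mem_append.mp ((List.takeWhile_append_dropWhile (p := PySem.Chars.isspace) (l := cs)) ▸ hc) with h2 | h2
    · exact List.mem_takeWhile_imp h2
    · exact hall c h2

lemma lstrip_append_ws {x y : List Char} (h : ∀ c ∈ x, PySem.Chars.isspace c = true) :
    PySem.Chars.lstrip (x ++ y) = PySem.Chars.lstrip y := by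
  unfold PySem.Chars.lstrip
  rw [List.dropWhile_append, List.dropWhile_eq_nil_iff.mpr h]
  simp

lemma rstrip_append_ws {x y : List Char} (h : ∀ c ∈ y, PySem.Chars.isspace c = true) :
    PySem.Chars.rstrip (x ++ y) = PySem.Chars.rstrip x := by
  unfold PySem.Chars.rstrip
  rw [List.reverse_append, List.dropWhile_append,
    List.dropWhile_eq_nil_iff.mpr (by intro c hc; exact h c (by simpa using hc))]
  simp

lemma strip_append_left {x y : List Char} (h : ∀ c ∈ x, PySem.Chars.isspace c = true) :
    PySem.Chars.strip (x ++ y) = PySem.Chars.strip y := by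
  unfold PySem.Chars.strip
  rw [lstrip_append_ws h]

lemma strip_append_right {x y : List Char} (h : ∀ c ∈ y, PySem.Chars.isspace c = true) :
    PySem.Chars.strip (x ++ y) = PySem.Chars.strip x := by
  unfold PySem.Chars.strip PySem.Chars.lstrip
  rw [List.dropWhile_append]
  by_cases h1 : List.dropWhile PySem.Chars.isspace x = []
  · have hy : List.dropWhile PySem.Chars.isspace y = [] := List.dropWhile_eq_nil_iff.mpr h
    rw [h1, hy]
    simp [PySem.Chars.rstrip]
  · have : (List.dropWhile PySem.Chars.isspace x).isEmpty = false := by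
      simpa [List.isEmpty_iff] using h1
    rw [this]
    simp only [Bool.false_eq_true, if_false]
    exact rstrip_append_ws h

lemma join_append_last (sep q : List Char) (ps : List (List Char)) (h : ps ≠ []) :
    PySem.Chars.join sep (ps ++ [q]) = PySem.Chars.join sep ps ++ sep ++ q := by
  induction ps with
  | nil => exact absurd rfl h
  | cons p ps ih =>
    cases ps with
    | nil => simp [PySem.Chars.join_cons_cons, PySem.Chars.join_singleton]
    | cons p2 t =>
      have : (p :: p2 :: t) ++ [q] = p :: p2 :: (t ++ [q]) := by simp
      rw [this, PySem.Chars.join_cons_cons, PySem.Chars.join_cons_cons]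
      have := ih (by simp)
      rw [show (p2 :: t) ++ [q] = p2 :: (t ++ [q]) from by simp] at this
      rw [this]
      simp [List.append_assoc]

-- dropping a blank head line does not change join-then-strip
lemma strip_join_blank_head (l : String) (t : List String) (hl : PySem.Str.strip l = "") :
    PySem.Str.strip (PySem.Str.join "\n" (l :: t)) = PySem.Str.strip (PySem.Str.join "\n" t) := by
  have h0 : PySem.Chars.strip l.toList = [] := by
    have := congrArg String.toList hl
    simpa using this
  have hl' : ∀ c ∈ l.toList, PySem.Chars.isspace c = true := strip_eq_nil_all_ws h0
  rw [← String.toList_inj]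
  simp only [PySem.Str.toList_strip, PySem.Str.toList_join, List.map_cons]
  cases t with
  | nil =>
    simp only [List.map_nil, PySem.Chars.join_singleton, PySem.Chars.join_nil, h0]
    simp [PySem.Chars.strip, PySem.Chars.lstrip, PySem.Chars.rstrip]
  | cons y t' =>
    rw [List.map_cons, PySem.Chars.join_cons_cons]
    rw [show l.toList ++ ("\n").toList ++ PySem.Chars.join ("\n").toList (y.toList :: List.map String.toList t')
        = (l.toList ++ ("\n").toList) ++ PySem.Chars.join ("\n").toList (y.toList :: List.map String.toList t') from by
      simp [List.append_assoc]]
    apply strip_append_left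
    intro c hc
    rcases List.mem_append.mp hc with hc | hc
    · exact hl' c hc
    · have : c = '\n' := by simpa using hc
      subst this; decide

-- dropping a blank last line does not change join-then-strip
lemma strip_join_blank_last (l : String) (t : List String) (hl : PySem.Str.strip l = "") :
    PySem.Str.strip (PySem.Str.join "\n" (t ++ [l])) = PySem.Str.strip (PySem.Str.join "\n" t) := by
  have h0 : PySem.Chars.strip l.toList = [] := by
    have := congrArg String.toList hl
    simpa using this
  have hl' : ∀ c ∈ l.toList, PySem.Chars.isspace c = true := strip_eq_nil_all_ws h0
  rw [← String.toList_inj]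
  simp only [PySem.Str.toList_strip, PySem.Str.toList_join, List.map_append, List.map_cons, List.map_nil]
  cases t with
  | nil =>
    simp only [List.map_nil, List.nil_append, PySem.Chars.join_singleton, PySem.Chars.join_nil, h0]
    simp [PySem.Chars.strip, PySem.Chars.lstrip, PySem.Chars.rstrip]
  | cons y t' =>
    rw [join_append_last _ _ _ (by simp), List.append_assoc]
    apply strip_append_right
    intro c hc
    rcases List.mem_append.mp hc with hc | hc
    · have : c = '\n' := by simpa using hc
      subst this; decide
    · exact hl' c hc

lemma strip_join_popLeading (xs : List String) :
    PySem.Str.strip (PySem.Str.join "\n" (popLeadingBlank xs)) = PySem.Str.strip (PySem.Str.join "\n" xs) := by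
  induction xs with
  | nil => rfl
  | cons l t ih =>
    by_cases hl : PySem.Str.strip l = ""
    · rw [show popLeadingBlank (l :: t) = popLeadingBlank t from by simp [popLeadingBlank, hl],
        ih, strip_join_blank_head l t hl]
    · rw [show popLeadingBlank (l :: t) = l :: t from by simp [popLeadingBlank, hl]]

lemma strip_join_popTrailing (xs : List String) :
    PySem.Str.strip (PySem.Str.join "\n" ((popLeadingBlank xs.reverse).reverse)) = PySem.Str.strip (PySem.Str.join "\n" xs) := by
  rw [show xs = xs.reverse.reverse from (List.reverse_reverse xs).symm]
  generalize xs.reverse = ys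
  simp only [List.reverse_reverse]
  induction ys with
  | nil => rfl
  | cons l t ih =>
    by_cases hl : PySem.Str.strip l = ""
    · rw [show popLeadingBlank (l :: t) = popLeadingBlank t from by simp [popLeadingBlank, hl],
        ih, List.reverse_cons, strip_join_blank_last l t.reverse hl]
    · rw [show popLeadingBlank (l :: t) = l :: t from by simp [popLeadingBlank, hl]]

lemma loopA_collecting (ls : List String) : ∀ acc,
    extractLoopA ls true acc = acc ++ ls.takeWhile (fun l =>
      !(decide (PySem.Str.strip l = "Checks:" ∨ PySem.Str.strip l = "Failure triggers:"))) := by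
  induction ls with
  | nil => intro acc; simp [extractLoopA]
  | cons l t ih =>
    intro acc
    by_cases hm : PySem.Str.strip l = "Checks:" ∨ PySem.Str.strip l = "Failure triggers:"
    · simp only [extractLoopA, if_neg (by decide : ¬ (true = false)), if_pos hm]
      rw [List.takeWhile_cons]
      rcases hm with hm | hm <;> simp [hm]
    · simp only [extractLoopA, if_neg (by decide : ¬ (true = false)), if_neg hm]
      rw [ih (acc ++ [l]), List.takeWhile_cons]
      have : (!decide (PySem.Str.strip l = "Checks:" ∨ PySem.Str.strip l = "Failure triggers:")) = true := by
        simpa using hm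
      simp only [this, if_pos]
      simp

lemma take_findIdx_getD {α : Type} (p : α → Bool) (ls : List α) :
    ls.take ((List.findIdx? p ls).getD ls.length) = ls.takeWhile (fun x => !p x) := by
  induction ls with
  | nil => rfl
  | cons x t ih =>
    rw [List.findIdx?_cons]
    by_cases hx : p x
    · simp [hx]
    · have hgetD : (Option.map (fun i => i + 1) (List.findIdx? p t)).getD (x :: t).length
          = (List.findIdx? p t).getD t.length + 1 := by
        cases List.findIdx? p t <;> simp
      rw [if_neg (by simp [hx]), hgetD, List.take_succ_cons, List.takeWhile_cons, ih]
      simp [hx]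

lemma sliceFrom_succ (xs : List String) (k : Nat) :
    PySem.List.slice xs (some ((k : Int) + 1)) none = xs.drop (k + 1) := by
  rw [show ((k : Int) + 1) = ((k + 1 : Nat) : Int) from by push_cast; ring,
    PySem.List.slice_from xs (by positivity)]
  simp

lemma sliceTo_nat (xs : List String) (k : Nat) :
    PySem.List.slice xs none (some (k : Int)) = xs.take k := by
  rw [PySem.List.slice_to xs (by positivity)]
  simp

lemma extractB_some {lines : List String} {k : Nat}
    (h : List.findIdx? (fun l => PySem.Str.startswith l "Request:") lines = some k) :
    extractB_lines lines = PySem.Str.strip (PySem.Str.join "\n"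
      (PySem.Str.strip (pyPartitionAfterColon ((lines[k]?).getD ""))
        :: (lines.drop (k + 1)).takeWhile (fun l =>
            !(decide (PySem.Str.strip l = "Checks:" ∨ PySem.Str.strip l = "Failure triggers:"))))) := by
  unfold extractB_lines
  rw [h]
  simp only [sliceFrom_succ, sliceTo_nat, PySem.List.pyGet?_natCast, take_findIdx_getD]

lemma extractB_none {lines : List String}
    (h : List.findIdx? (fun l => PySem.Str.startswith l "Request:") lines = none) :
    extractB_lines lines = "" := by
  unfold extractB_lines
  rw [h]

lemma core (lines : List String) : extractA_lines lines = extractB_lines lines := by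
  induction lines with
  | nil => decide
  | cons l rest ih =>
    by_cases hP : PySem.Str.startswith l "Request:" = true
    · -- head is the "Request:" line
      have hfind : List.findIdx? (fun l => PySem.Str.startswith l "Request:") (l :: rest) = some 0 := by
        rw [List.findIdx?_cons, hP, if_pos rfl]
      rw [extractB_some hfind]
      unfold extractA_lines
      simp only [extractLoopA, hP, if_pos]
      rw [loopA_collecting, strip_join_popTrailing, strip_join_popLeading]
      simp only [List.getElem?_cons_zero, Option.getD_some, List.drop_succ_cons, List.drop_zero,
        List.nil_append]
      by_cases h0 : PySem.Str.strip (pyPartitionAfterColon l) ≠ ""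
      · rw [if_pos h0]
        simp
      · rw [if_neg h0]
        rw [not_not] at h0
        rw [h0, strip_join_blank_head "" _ (by decide), List.nil_append]
    · -- head is not the "Request:" line: both sides step to the tail
      have hP' : PySem.Str.startswith l "Request:" = false := by simpa using hP
      have hA : extractA_lines (l :: rest) = extractA_lines rest := by
        unfold extractA_lines
        simp only [extractLoopA, hP']
        simp
      cases h : List.findIdx? (fun l => PySem.Str.startswith l "Request:") rest with
      | none =>
        have hcons : List.findIdx? (fun l => PySem.Str.startswith l "Request:") (l :: rest) = none := by
          rw [List.findIdx?_cons, hP', h]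
          simp
        rw [hA, ih, extractB_none h, extractB_none hcons]
      | some i =>
        have hcons : List.findIdx? (fun l => PySem.Str.startswith l "Request:") (l :: rest) = some (i + 1) := by
          rw [List.findIdx?_cons, hP', h]
          simp
        rw [hA, ih, extractB_some h, extractB_some hcons]
        simp

-- ===== VERDICT (by name: the statement is the Claim_ definition above) =====
theorem extract_request_py_spec : Claim_equal_extract_request_py := by
  intro text _
  unfold Spec_extract_request_py extract_request_py extract_request_py_alt
  exact core _
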